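-- pv_equiv track=rewrite | github.com/cryptogeek0610/StellaSentinal | src/device_anomaly/models/cohort_detector.py | _infer_pattern_type
-- ===== SOURCE A (Python) =====
-- def _infer_pattern_type(
--
--     dimensions: list[str],
--     cohort_def: dict[str, str],
-- ) -> str:
--     """Infer the pattern type from dimensions."""
--     if "FirmwareVersion" in dimensions:
--         return "firmware_issue"
--     if "ModelId" in dimensions or "ManufacturerId" in dimensions:
--         return "model_issue"
--     if "OsVersionId" in dimensions:
--         return "os_issue"
--     if any(d in dimensions for d in ("LocationRegion", "SiteId", "BusinessUnit")):
--         return "location_issue"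
--     if any(d in dimensions for d in ("Carrier", "CarrierCode")):
--         return "carrier_issue"
--     return "unknown_issue"
-- ===== SOURCE B (Python) =====
-- _PRIORITY = {
--     "FirmwareVersion": 0,
--     "ModelId": 1,
--     "ManufacturerId": 1,
--     "OsVersionId": 2,
--     "LocationRegion": 3,
--     "SiteId": 3,
--     "BusinessUnit": 3,
--     "Carrier": 4,
--     "CarrierCode": 4,
-- }
-- _LABELS = [
--     "firmware_issue",
--     "model_issue",
--     "os_issue",
--     "location_issue",
--     "carrier_issue",
--     "unknown_issue",
-- ]
--
--
-- def _infer_pattern_type(dimensions, cohort_def):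
--     """Single pass: keep the minimum priority of any recognised dimension."""
--     best = 5
--     for d in dimensions:
--         best = min(best, _PRIORITY.get(d, 5))
--     return _LABELS[best]
-- ===== Notes on version B (the rewrite author's own statement) =====
-- stated objective: alternative
-- what changed: Instead of repeatedly scanning dimensions once per rule in an if-cascade, B makes a single pass over dimensions with a min-priority accumulator (name->priority map) and indexes a label table with the minimum priority found.
import Mathlib
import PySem

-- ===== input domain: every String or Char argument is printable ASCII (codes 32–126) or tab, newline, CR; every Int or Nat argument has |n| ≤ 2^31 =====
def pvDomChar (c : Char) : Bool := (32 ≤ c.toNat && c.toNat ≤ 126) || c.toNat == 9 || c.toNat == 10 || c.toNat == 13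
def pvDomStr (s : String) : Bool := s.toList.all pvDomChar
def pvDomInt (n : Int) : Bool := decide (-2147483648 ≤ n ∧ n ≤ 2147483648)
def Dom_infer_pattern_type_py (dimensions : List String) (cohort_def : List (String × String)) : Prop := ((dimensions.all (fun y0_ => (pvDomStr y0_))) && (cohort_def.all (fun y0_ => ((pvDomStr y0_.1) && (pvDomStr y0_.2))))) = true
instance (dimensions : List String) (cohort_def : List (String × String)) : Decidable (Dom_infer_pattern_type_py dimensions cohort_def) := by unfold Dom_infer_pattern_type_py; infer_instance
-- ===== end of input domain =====

set_option maxHeartbeats 2000000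


-- B replaces A's if-cascade (each rule re-scanning dimensions) with a single pass over
-- dimensions keeping the minimum priority from a name→priority map, then indexing a label
-- table with that minimum; an alternative decomposition of the same cost.

-- ===== PORT A =====
-- literal transliteration of A's if-chain; 'x in dimensions' → dimensions.contains x
def infer_pattern_type_py (dimensions : List String) (cohort_def : List (String × String)) : String :=
  if dimensions.contains "FirmwareVersion" then "firmware_issue"
  else if dimensions.contains "ModelId" || dimensions.contains "ManufacturerId" then "model_issue"
  else if dimensions.contains "OsVersionId" then "os_issue"
  else if (["LocationRegion", "SiteId", "BusinessUnit"].any fun d => dimensions.contains d) then "location_issue"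
  else if (["Carrier", "CarrierCode"].any fun d => dimensions.contains d) then "carrier_issue"
  else "unknown_issue"

-- ===== PORT B =====
-- Source B's _PRIORITY dict and _LABELS table
def pvPriority : PySem.Dict String Nat := PySem.Dict.ofList
  [("FirmwareVersion", 0), ("ModelId", 1), ("ManufacturerId", 1), ("OsVersionId", 2),
   ("LocationRegion", 3), ("SiteId", 3), ("BusinessUnit", 3), ("Carrier", 4), ("CarrierCode", 4)]

def pvLabels : List String :=
  ["firmware_issue", "model_issue", "os_issue", "location_issue", "carrier_issue", "unknown_issue"]

-- Source B's loop: best = min(best, _PRIORITY.get(d, 5)) over dimensions, then _LABELS[best]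
-- (all priorities are nonnegative and best stays in [0,5], so Nat min and List.getD are exact here)
def infer_pattern_type_py_alt (dimensions : List String) (cohort_def : List (String × String)) : String :=
  let best := dimensions.foldl (fun b d => min b (PySem.Dict.getD pvPriority d 5)) 5
  pvLabels.getD best "unknown_issue"

-- ===== PRECONDITION & SPEC =====
def Spec_infer_pattern_type_py (dimensions : List String) (cohort_def : List (String × String)) (out : String) : Prop := out = infer_pattern_type_py_alt dimensions cohort_def
instance (dimensions : List String) (cohort_def : List (String × String)) (out : String) : Decidable (Spec_infer_pattern_type_py dimensions cohort_def out) := by unfold Spec_infer_pattern_type_py; infer_instance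

-- ===== CLAIM =====
def Claim_equal_infer_pattern_type_py : Prop := ∀ (dimensions : List String) (cohort_def : List (String × String)), Dom_infer_pattern_type_py dimensions cohort_def → Spec_infer_pattern_type_py dimensions cohort_def (infer_pattern_type_py dimensions cohort_def)

-- ===== LEMMAS AND PROOFS =====

-- the priority map's lookup as an if-chain on the key (the simp normal form of the dict literal)
theorem pvPriority_getD (d : String) :
    PySem.Dict.getD pvPriority d 5 =
      (if d = "CarrierCode" then 4 else if d = "Carrier" then 4 else if d = "BusinessUnit" then 3
       else if d = "SiteId" then 3 else if d = "LocationRegion" then 3 else if d = "OsVersionId" then 2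
       else if d = "ManufacturerId" then 1 else if d = "ModelId" then 1 else if d = "FirmwareVersion" then 0 else 5) := by
  simp [pvPriority, PySem.Dict.ofList, PySem.Dict.update, List.foldl,
        PySem.Dict.getD_insert, PySem.Dict.getD_empty]

-- folding min from any start a ≤ 5 equals min of a and the fold from 5
theorem pvFold_min (l : List String) : ∀ a : Nat, a ≤ 5 →
    l.foldl (fun b d => min b (PySem.Dict.getD pvPriority d 5)) a
      = min a (l.foldl (fun b d => min b (PySem.Dict.getD pvPriority d 5)) 5) := by
  induction l with
  | nil => intro a ha; simp; omega
  | cons d l ih =>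
      intro a ha
      have hp : PySem.Dict.getD pvPriority d 5 ≤ 5 := by
        rw [pvPriority_getD]; split_ifs <;> omega
      simp only [List.foldl_cons]
      rw [ih (min a (PySem.Dict.getD pvPriority d 5)) (by omega),
          ih (min 5 (PySem.Dict.getD pvPriority d 5)) (by omega)]
      omega

-- the fold computes the least priority present, i.e. A's rule order in numeric form
theorem pvFold_char (l : List String) :
    l.foldl (fun b d => min b (PySem.Dict.getD pvPriority d 5)) 5
      = (if l.contains "FirmwareVersion" then 0
         else if l.contains "ModelId" || l.contains "ManufacturerId" then 1
         else if l.contains "OsVersionId" then 2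
         else if l.contains "LocationRegion" || l.contains "SiteId" || l.contains "BusinessUnit" then 3
         else if l.contains "Carrier" || l.contains "CarrierCode" then 4
         else 5) := by
  induction l with
  | nil => simp
  | cons d l ih =>
      simp only [List.foldl_cons]
      rw [pvFold_min l _ (by rw [pvPriority_getD]; split_ifs <;> omega), ih, pvPriority_getD]
      simp only [List.contains_cons, Bool.or_eq_true, beq_iff_eq, @eq_comm String d]
      split_ifs <;> first | omega | tauto | (exfalso; subst_vars; simp_all)

-- ===== VERDICT =====
theorem infer_pattern_type_py_spec : Claim_equal_infer_pattern_type_py := by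
  intro dims cd _
  unfold Spec_infer_pattern_type_py infer_pattern_type_py infer_pattern_type_py_alt
  rw [pvFold_char]
  simp only [List.any_cons, List.any_nil, Bool.or_false]
  split_ifs <;> first | rfl | simp_all
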